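-- pv_equiv track=rewrite | github.com/Sobol-EV/Dialog_Backup_VK | functions/utilits.py | get_count_message_25
-- ===== SOURCE A (Python) =====
-- def get_count_message_25(count_message):
--     с_count_message = count_message // 200
--     ost_count_message = count_message % 200
--     arr_msg = []
--     arr_msg_w = []
--     ost_dict = {}
--     for i in range(с_count_message):
--         arr_msg.append(i*200)
--     n = 0
--     for i in range(1, (len(arr_msg) // 25) + 1):
--         arr_msg_w.append(arr_msg[n:i*25])
--         n = i*25
--     if arr_msg[n:]:
--         arr_msg_w.append(arr_msg[n:])
--     if с_count_message == 0:
--         if ost_count_message != 0: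
--             ost_dict["ofs"] = 0
--             ost_dict["count"] = ost_count_message
--     else:
--         if ost_count_message != 0:
--             ost_dict["ofs"] = arr_msg_w[-1][-1] + 200
--             ost_dict["count"] = ost_count_message
--
--     return arr_msg_w, ost_dict
-- ===== SOURCE B (Python) =====
-- def get_count_message_25(count_message):
--     c = count_message // 200
--     ost = count_message % 200
--     chunks = []
--     j = 0
--     while j * 25 < c:
--         size = min(25, c - j * 25)
--         chunks.append([(j * 25 + k) * 200 for k in range(size)])
--         j += 1
--     ost_dict = {"ofs": c * 200, "count": ost} if ost != 0 else {}
--     return chunks, ost_dict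
-- ===== Notes on version B (the rewrite author's own statement) =====
-- stated objective: simpler
-- what changed: B computes c=count//200 and ost=count%200 up front, emits each 25-offset chunk directly by formula in a single while loop (no intermediate flat offset list, no slicing pass, no special-casing of the last partial chunk or of c==0 for the remainder dict, whose ofs is always c*200), instead of A's three phases: build the flat offset list, slice it into chunks plus a separate tail append, then branch on c==0 to pick ofs from the last element of the last chunk.
-- outside the precondition, e.g. on get_count_message_25(-1): A raises IndexError, B returns ([], {'ofs': -200, 'count': 199})
import Mathlib
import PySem

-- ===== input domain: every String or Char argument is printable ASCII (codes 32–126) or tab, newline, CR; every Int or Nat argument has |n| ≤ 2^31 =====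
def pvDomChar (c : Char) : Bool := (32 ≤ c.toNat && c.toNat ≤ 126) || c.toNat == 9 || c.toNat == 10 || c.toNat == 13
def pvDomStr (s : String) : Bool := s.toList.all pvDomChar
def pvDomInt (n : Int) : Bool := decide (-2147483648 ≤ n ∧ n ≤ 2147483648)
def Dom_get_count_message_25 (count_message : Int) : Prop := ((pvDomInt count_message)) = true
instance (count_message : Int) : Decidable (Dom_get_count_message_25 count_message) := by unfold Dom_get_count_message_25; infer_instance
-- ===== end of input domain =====

-- B replaces A's three phases (flat offset list; slicing loop plus tail append; branch on c==0
-- for the remainder dict) by one loop emitting each 25-chunk directly by formula, with ofs = c*200.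

-- ===== PORT A =====
def get_count_message_25 (count_message : Int) : List (List Int) × (List (String × Int)) :=
  let c := PySem.Int.floordiv count_message 200
  let ost := PySem.Int.mod count_message 200
  let arr_msg : List Int :=
    (PySem.List.pyRange 0 c 1).foldl (fun acc i => acc ++ [i * 200]) []
  let st :=
    (PySem.List.pyRange 1 (PySem.Int.floordiv (arr_msg.length : Int) 25 + 1) 1).foldl
      (fun (st : List (List Int) × Int) i =>
        (st.1 ++ [PySem.List.slice arr_msg (some st.2) (some (i * 25))], i * 25))
      ([], 0)
  let tail := PySem.List.slice arr_msg (some st.2) none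
  let arr_msg_w := if tail ≠ [] then st.1 ++ [tail] else st.1
  -- the dict assignments "ofs" then "count" build this two-entry association list;
  -- arr_msg_w[-1][-1] is ported with pyGetD (Pre_ guarantees both lists are nonempty there)
  let ost_dict : List (String × Int) :=
    if c = 0 then
      if ost ≠ 0 then [("ofs", 0), ("count", ost)] else []
    else
      if ost ≠ 0 then
        [("ofs", PySem.List.pyGetD (PySem.List.pyGetD arr_msg_w (-1) []) (-1) 0 + 200), ("count", ost)]
      else []
  (arr_msg_w, ost_dict)

-- ===== PORT B =====
-- the while loop of Source B: emit chunk j while j*25 < c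
def altChunks (c : Int) (j : Nat) : List (List Int) :=
  if h : (j : Int) * 25 < c then
    ((PySem.List.pyRange 0 (min 25 (c - (j : Int) * 25)) 1).map
        (fun k => ((j : Int) * 25 + k) * 200)) :: altChunks c (j + 1)
  else []
termination_by (c - (j : Int) * 25).toNat
decreasing_by push_cast; omega

def get_count_message_25_alt (count_message : Int) : List (List Int) × (List (String × Int)) :=
  let c := PySem.Int.floordiv count_message 200
  let ost := PySem.Int.mod count_message 200
  let ost_dict : List (String × Int) :=
    if ost ≠ 0 then [("ofs", c * 200), ("count", ost)] else []
  (altChunks c 0, ost_dict)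

-- ===== PRECONDITION & SPEC =====
-- Pre_ excludes exactly the inputs where A raises IndexError: negative count_message not
-- divisible by 200 (empty chunk list but nonzero remainder, so arr_msg_w[-1] fails).
def Pre_get_count_message_25 (count_message : Int) : Prop :=
  0 ≤ count_message ∨ PySem.Int.mod count_message 200 = 0
instance (count_message : Int) : Decidable (Pre_get_count_message_25 count_message) := by
  unfold Pre_get_count_message_25; infer_instance

def pvWitness_get_count_message_25 : Int := 12345

def Spec_get_count_message_25 (count_message : Int) (out : List (List Int) × (List (String × Int))) : Prop := out = get_count_message_25_alt count_message
instance (count_message : Int) (out : List (List Int) × (List (String × Int))) : Decidable (Spec_get_count_message_25 count_message out) := by unfold Spec_get_count_message_25; infer_instance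

-- ===== CLAIM (what is proved, stated in full; the proofs are below) =====
def Claim_equal_get_count_message_25 : Prop := ∀ (count_message : Int), Dom_get_count_message_25 count_message → Pre_get_count_message_25 count_message → Spec_get_count_message_25 count_message (get_count_message_25 count_message)


-- ===== LEMMAS AND PROOFS =====

-- the chunk starting at offset index 25*j with s elements
def chunkAt (j s : Nat) : List Int :=
  (List.range s).map (fun k => ((25 * j + k : Nat) : Int) * 200)

-- the common closed form of both chunk lists, for c = m ≥ 0
def chunksW (m : Nat) : List (List Int) :=
  (List.range (m / 25)).map (fun t => chunkAt t 25)
    ++ (if m % 25 = 0 then [] else [chunkAt (m / 25) (m % 25)])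

theorem pyChunk (j s : Nat) : (PySem.List.pyRange 0 ((s : Nat) : Int) 1).map
    (fun k => ((j : Int) * 25 + k) * 200) = chunkAt j s := by
  rw [PySem.List.pyRange_zero_natCast]
  simp only [chunkAt, List.map_map, Function.comp_def]
  apply List.map_congr_left
  intro k _
  push_cast
  ring

theorem altChunks_neg (c : Int) (hc : c ≤ 0) : altChunks c 0 = [] := by
  rw [altChunks]
  simp
  omega

theorem altChunks_spec (q : Nat) : ∀ (j r : Nat), r < 25 →
    altChunks ((25 * (j + q) + r : Nat) : Int) j
      = (List.range q).map (fun t => chunkAt (j + t) 25)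
        ++ (if r = 0 then [] else [chunkAt (j + q) r]) := by
  induction q with
  | zero =>
    intro j r hr
    rw [altChunks]
    rcases Nat.eq_zero_or_pos r with h0 | h0
    · subst h0
      simp
      omega
    · have hcond : ((j : Int)) * 25 < ((25 * (j + 0) + r : Nat) : Int) := by push_cast; omega
      rw [dif_pos hcond, altChunks]
      have hcond2 : ¬ (((j + 1 : Nat) : Int)) * 25 < ((25 * (j + 0) + r : Nat) : Int) := by push_cast; omega
      rw [dif_neg hcond2]
      have hmin : min (25:Int) (((25 * (j + 0) + r : Nat) : Int) - (j : Int) * 25) = ((r : Nat) : Int) := by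
        push_cast; omega
      rw [hmin, pyChunk]
      simp [if_neg (by omega : ¬ r = 0)]
  | succ q ih =>
    intro j r hr
    rw [altChunks]
    have hcond : ((j : Int)) * 25 < ((25 * (j + (q+1)) + r : Nat) : Int) := by push_cast; omega
    rw [dif_pos hcond]
    have hmin : min (25:Int) (((25 * (j + (q+1)) + r : Nat) : Int) - (j : Int) * 25) = ((25:Nat) : Int) := by
      push_cast; omega
    rw [hmin, pyChunk]
    have harg : ((25 * (j + (q+1)) + r : Nat) : Int) = ((25 * ((j+1) + q) + r : Nat) : Int) := by
      push_cast; ring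
    rw [harg, ih (j+1) r hr]
    rw [List.range_succ_eq_map]
    simp only [List.map_cons, List.map_map, Function.comp_def, List.cons_append]
    have e1 : (fun x => chunkAt (j + x.succ) 25) = (fun t => chunkAt (j + 1 + t) 25) :=
      funext fun t => by rw [show j + t.succ = j + 1 + t from by omega]
    rw [e1, show j + (q + 1) = j + 1 + q from by omega]
    simp

theorem altChunks_chunksW (m : Nat) : altChunks ((m : Int)) 0 = chunksW m := by
  have h := altChunks_spec (m / 25) 0 (m % 25) (by omega)
  rw [show 25 * (0 + m / 25) + m % 25 = m from by omega] at h
  rw [h, chunksW]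
  simp

theorem aLoop_spec (L : List Int) (q : Nat) :
    (PySem.List.pyRange 1 ((q : Int) + 1) 1).foldl
      (fun (st : List (List Int) × Int) i =>
        (st.1 ++ [PySem.List.slice L (some st.2) (some (i * 25))], i * 25))
      ([], 0)
    = ((List.range q).map
        (fun t => PySem.List.slice L (some ((25 * t : Nat) : Int)) (some ((25 * (t + 1) : Nat) : Int))),
       ((25 * q : Nat) : Int)) := by
  induction q with
  | zero => simp
  | succ q ih =>
    rw [show (((q+1) : Nat) : Int) + 1 = ((q : Int) + 1) + 1 from by push_cast; ring,
        PySem.List.pyRange_one_succ_right (by omega), List.foldl_append, ih]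
    simp only [List.foldl_cons, List.foldl_nil, List.range_succ, List.map_append, List.map_cons,
      List.map_nil]
    rw [show ((q : Int) + 1) * 25 = ((25 * (q + 1) : Nat) : Int) from by push_cast; ring]

theorem drop_map_range (f : Nat → Int) (n a : Nat) :
    ((List.range n).map f).drop a = (List.range (n - a)).map (fun k => f (a + k)) := by
  rw [← List.map_drop, List.range_eq_range', List.drop_range']
  simp [List.range'_eq_map_range, Function.comp_def]

theorem take_map_range (f : Nat → Int) (n a : Nat) (h : a ≤ n) :
    ((List.range n).map f).take a = (List.range a).map f := by
  rw [← List.map_take, List.take_range]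
  simp [Nat.min_eq_left h]

theorem chunkAt_ne_nil (j s : Nat) (hs : 0 < s) : chunkAt j s ≠ [] := by
  simp [chunkAt]
  omega

theorem chunkAt_getLast (j s : Nat) (h : chunkAt j s ≠ []) :
    (chunkAt j s).getLast h = ((25 * j + (s - 1) : Nat) : Int) * 200 := by
  rw [List.getLast_eq_getElem]
  simp [chunkAt]

theorem lastlast (m : Nat) (hm : 0 < m) :
    PySem.List.pyGetD (PySem.List.pyGetD (chunksW m) (-1) []) (-1) 0
      = ((m - 1 : Nat) : Int) * 200 := by
  unfold chunksW
  rcases Nat.eq_zero_or_pos (m % 25) with h0 | h0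
  · have hq : 0 < m / 25 := by omega
    rw [if_pos h0, List.append_nil]
    have hne : (List.range (m / 25)).map (fun t => chunkAt t 25) ≠ [] := by
      simp; omega
    rw [PySem.List.pyGetD_neg_one _ _ hne, List.getLast_eq_getElem]
    simp only [List.length_map, List.length_range, List.getElem_map, List.getElem_range]
    rw [PySem.List.pyGetD_neg_one _ _ (chunkAt_ne_nil _ 25 (by omega)),
        chunkAt_getLast _ 25 _]
    congr 1
    omega
  · rw [if_neg (by omega)]
    rw [PySem.List.pyGetD_neg_one_append_singleton]
    rw [PySem.List.pyGetD_neg_one _ _ (chunkAt_ne_nil _ _ h0), chunkAt_getLast _ _ _]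
    congr 1
    omega

theorem aChunks_chunksW (m : Nat) (L : List Int) (full : List (List Int)) (tail : List Int)
    (hL : L = (List.range m).map (fun k => ((k : Nat) : Int) * 200))
    (hfullDef : full = (List.range (m / 25)).map
      (fun t => PySem.List.slice L (some ((25 * t : Nat) : Int)) (some ((25 * (t + 1) : Nat) : Int))))
    (htailDef : tail = PySem.List.slice L (some ((25 * (m / 25) : Nat) : Int)) none) :
    (if tail ≠ [] then full ++ [tail] else full) = chunksW m := by
  have hfull : full = (List.range (m / 25)).map (fun t => chunkAt t 25) := by
    rw [hfullDef]
    apply List.map_congr_left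
    intro t ht
    rw [List.mem_range] at ht
    rw [PySem.List.slice_natCast, hL, drop_map_range,
        show 25 * (t + 1) - 25 * t = 25 from by omega,
        take_map_range _ _ _ (by omega)]
    rfl
  have htail : tail = chunkAt (m / 25) (m % 25) := by
    rw [htailDef, PySem.List.slice_from_natCast, hL, drop_map_range,
        show m - 25 * (m / 25) = m % 25 from by omega]
    rfl
  rcases Nat.eq_zero_or_pos (m % 25) with h0 | h0
  · have hnil : tail = [] := by rw [htail, h0]; rfl
    rw [if_neg (by simp [hnil]), hfull, chunksW, if_pos h0, List.append_nil]
  · have hne : tail ≠ [] := by rw [htail]; exact chunkAt_ne_nil _ _ h0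
    rw [if_pos hne, hfull, htail, chunksW, if_neg (by omega)]

-- ===== VERDICT (by name: the statement is the Claim_ definition above) =====
theorem get_count_message_25_spec : Claim_equal_get_count_message_25 := by
  intro n _ hpre
  unfold Spec_get_count_message_25
  simp only [get_count_message_25, get_count_message_25_alt]
  by_cases hn : 0 ≤ n
  · have h200 : (0:Int) < 200 := by norm_num
    have hc0 : 0 ≤ PySem.Int.floordiv n 200 := by
      rw [PySem.Int.floordiv_eq_ediv_of_pos h200]
      exact Int.ediv_nonneg hn (by norm_num)
    obtain ⟨m, hm⟩ : ∃ m : Nat, PySem.Int.floordiv n 200 = (m : Int) :=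
      ⟨(PySem.Int.floordiv n 200).toNat, (Int.toNat_of_nonneg hc0).symm⟩
    rw [hm, altChunks_chunksW]
    rw [PySem.List.pyRange_zero_natCast, PySem.List.foldl_append_singleton_eq_map,
        List.nil_append, List.map_map]
    set L := List.map ((fun i => i * 200) ∘ fun k => ((k : Nat) : Int)) (List.range m) with hLdef
    have hL : L = (List.range m).map (fun k => ((k : Nat) : Int) * 200) := rfl
    have hLen : ((L.length : Nat) : Int) = ((m : Nat) : Int) := by
      simp [hLdef]
    rw [hLen]
    have h25 : PySem.Int.floordiv ((m : Nat) : Int) 25 = (((m / 25 : Nat)) : Int) :=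
      PySem.Int.floordiv_natCast m 25
    rw [h25, aLoop_spec L (m / 25)]
    dsimp only
    have hW := aChunks_chunksW m L _ _ hL rfl rfl
    rw [hW]
    by_cases host : PySem.Int.mod n 200 = 0
    · have hd := (PySem.Int.mod_eq_zero_iff_dvd n 200).mp host
      simp [hd]
    · have hnd : ¬ 200 ∣ n := fun h => host ((PySem.Int.mod_eq_zero_iff_dvd n 200).mpr h)
      by_cases hm0 : m = 0
      · subst hm0
        simp [hnd]
      · rw [if_pos host, if_pos host, lastlast m (by omega)]
        have : ((m - 1 : Nat) : Int) * 200 + 200 = ((m : Nat) : Int) * 200 := by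
          push_cast [Nat.cast_sub (by omega : 1 ≤ m)]
          ring
        rw [this, if_neg (show ¬((m : Nat) : Int) = 0 from by exact_mod_cast hm0),
            if_pos host]
  · have host : PySem.Int.mod n 200 = 0 := by
      rcases hpre with h | h
      · omega
      · exact h
    have hdm := PySem.Int.floordiv_mul_add_mod n 200
    have hc : PySem.Int.floordiv n 200 < 0 := by omega
    rw [altChunks_neg _ (by omega)]
    rw [show PySem.List.pyRange 0 (PySem.Int.floordiv n 200) 1 = [] from by
      rw [PySem.List.pyRange_one, show ((PySem.Int.floordiv n 200) - 0).toNat = 0 from by omega]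
      rfl]
    simp only [List.foldl_nil, List.length_nil, Nat.cast_zero]
    rw [show PySem.Int.floordiv 0 25 = 0 from by decide]
    rw [show PySem.List.pyRange 1 (0+1) 1 = [] from by decide]
    simp only [List.foldl_nil]
    rw [show PySem.List.slice ([] : List Int) (some 0) none = [] from by decide]
    have hd := (PySem.Int.mod_eq_zero_iff_dvd n 200).mp host
    simp [hd]
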